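-- pv_equiv track=rewrite | github.com/swapnilr/gatech | omscs/vision-4495/ps1/part2.py | filter_peaks
-- ===== SOURCE A (Python) =====
-- def filter_peaks(peaks, distance=50, degree_diff=2):
--     filtered = []
--     for i in range(len(peaks)):
--         for j in range(len(peaks)):
--             if i != j:
--                 correctDist = abs(peaks[i][0] - peaks[j][0]) < distance
--                 correctDeg = abs(peaks[i][1] - peaks[j][1]) < degree_diff
--                 if correctDist and correctDeg:
--                     filtered.append(peaks[i])
--     return filtered
-- ===== SOURCE B (Python) =====
-- def filter_peaks(peaks, distance=50, degree_diff=2):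
--     """Spatial hash: bucket peaks by x // distance, then each peak only scans
--     its own and the two adjacent buckets for near neighbors instead of the
--     whole list, and is emitted once per neighbor found."""
--     if distance <= 0 or degree_diff <= 0:
--         return []
--     grid = {}
--     for p in peaks:
--         grid.setdefault(p[0] // distance, []).append(p)
--     out = []
--     for x, d in peaks:
--         b = x // distance
--         k = -1  # the scan below meets (x, d) itself in its own bucket
--         for cell in (b - 1, b, b + 1):
--             for x2, d2 in grid.get(cell, []):
--                 if abs(x - x2) < distance and abs(d - d2) < degree_diff:
--                     k += 1
--         out.extend([(x, d)] * k)
--     return out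
-- ===== Notes on version B (the rewrite author's own statement) =====
-- stated objective: alternative
-- what changed: Replaces the all-pairs double loop with a spatial hash: peaks are bucketed by x // distance in one pass, and each peak counts its near neighbors by scanning only its own and the two adjacent buckets, then is emitted that many times.
import Mathlib
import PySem

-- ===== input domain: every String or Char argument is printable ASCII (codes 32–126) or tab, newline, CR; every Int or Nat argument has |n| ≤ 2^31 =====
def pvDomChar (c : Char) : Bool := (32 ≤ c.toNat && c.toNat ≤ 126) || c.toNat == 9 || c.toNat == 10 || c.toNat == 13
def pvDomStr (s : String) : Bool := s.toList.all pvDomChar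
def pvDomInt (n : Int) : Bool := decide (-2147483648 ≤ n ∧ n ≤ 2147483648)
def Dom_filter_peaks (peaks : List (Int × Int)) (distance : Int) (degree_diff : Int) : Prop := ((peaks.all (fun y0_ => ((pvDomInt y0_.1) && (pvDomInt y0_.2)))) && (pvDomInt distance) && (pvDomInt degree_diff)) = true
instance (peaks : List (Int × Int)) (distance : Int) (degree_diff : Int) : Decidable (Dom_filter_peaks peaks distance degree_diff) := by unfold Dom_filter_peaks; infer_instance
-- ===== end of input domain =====

-- B replaces A's all-pairs double loop with a spatial hash bucketed by x // distance; each peak scans only three buckets.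

-- ===== PORT A =====
def filter_peaks (peaks : List (Int × Int)) (distance : Int) (degree_diff : Int) : List (Int × Int) :=
  (PySem.List.pyRange 0 peaks.length 1).foldl (fun filtered i =>
    (PySem.List.pyRange 0 peaks.length 1).foldl (fun filtered j =>
      if i ≠ j then
        let pi := PySem.List.pyGetD peaks i (0, 0)
        let pj := PySem.List.pyGetD peaks j (0, 0)
        let correctDist := |pi.1 - pj.1| < distance
        let correctDeg := |pi.2 - pj.2| < degree_diff
        if correctDist ∧ correctDeg then filtered ++ [pi] else filtered
      else filtered) filtered) []

-- ===== PORT B =====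
def filter_peaks_alt (peaks : List (Int × Int)) (distance : Int) (degree_diff : Int) : List (Int × Int) :=
  if distance ≤ 0 ∨ degree_diff ≤ 0 then []
  else
    let grid : PySem.Dict Int (List (Int × Int)) :=
      peaks.foldl (fun g p => g.modify (PySem.Int.floordiv p.1 distance) [] (· ++ [p])) PySem.Dict.empty
    peaks.foldl (fun out p =>
      let b := PySem.Int.floordiv p.1 distance
      let k : Int := [b - 1, b, b + 1].foldl (fun k c =>
        (grid.getD c []).foldl (fun k q =>
          if |p.1 - q.1| < distance ∧ |p.2 - q.2| < degree_diff then k + 1 else k) k) (-1)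
      out ++ List.replicate k.toNat p) []

-- ===== PRECONDITION & SPEC =====
def Spec_filter_peaks (peaks : List (Int × Int)) (distance : Int) (degree_diff : Int) (out : List (Int × Int)) : Prop := out = filter_peaks_alt peaks distance degree_diff
instance (peaks : List (Int × Int)) (distance : Int) (degree_diff : Int) (out : List (Int × Int)) : Decidable (Spec_filter_peaks peaks distance degree_diff out) := by unfold Spec_filter_peaks; infer_instance

-- ===== CLAIM (what is proved, stated in full; the proofs are below) =====
def Claim_equal_filter_peaks : Prop := ∀ (peaks : List (Int × Int)) (distance : Int) (degree_diff : Int), Dom_filter_peaks peaks distance degree_diff → Spec_filter_peaks peaks distance degree_diff (filter_peaks peaks distance degree_diff)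

-- ===== LEMMAS AND PROOFS =====

-- A's inner j-loop appends a fixed element once per index passing the two tests.
theorem inner_fold {α : Type} (i : Int) (x : α) (P : Int → Prop) [DecidablePred P] :
    ∀ (L : List Int) (acc : List α),
      L.foldl (fun acc j => if i ≠ j then (if P j then acc ++ [x] else acc) else acc) acc
        = acc ++ List.replicate (L.countP (fun j => decide (i ≠ j) && decide (P j))) x := by
  intro L
  induction L with
  | nil => intro acc; simp
  | cons a L ih =>
    intro acc
    rw [List.foldl_cons, List.countP_cons]
    by_cases h1 : i ≠ a
    · by_cases h2 : P a
      · rw [if_pos h1, if_pos h2, ih]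
        simp [h1, h2, List.replicate_succ, List.append_assoc]
      · rw [if_pos h1, if_neg h2, ih]
        simp [h2]
    · rw [if_neg h1, ih]
      simp [h1]

-- A in closed form: each peak, in order, replicated (#matching occurrences − selfhit) times.
theorem A_closed (peaks : List (Int × Int)) (distance degree_diff : Int) :
    filter_peaks peaks distance degree_diff
      = peaks.flatMap (fun p =>
          List.replicate
            (((peaks.countP (fun q => decide (|p.1 - q.1| < distance ∧ |p.2 - q.2| < degree_diff)) : Int)
              - (if 0 < distance ∧ 0 < degree_diff then 1 else 0)).toNat) p) := by
  unfold filter_peaks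
  have hinner : ∀ (acc : List (Int × Int)) (i : Int),
      (PySem.List.pyRange 0 peaks.length 1).foldl (fun filtered j =>
        if i ≠ j then
          let pi := PySem.List.pyGetD peaks i (0, 0)
          let pj := PySem.List.pyGetD peaks j (0, 0)
          let correctDist := |pi.1 - pj.1| < distance
          let correctDeg := |pi.2 - pj.2| < degree_diff
          if correctDist ∧ correctDeg then filtered ++ [pi] else filtered
        else filtered) acc
      = acc ++ List.replicate
          ((PySem.List.pyRange 0 peaks.length 1).countP (fun j =>
            decide (i ≠ j) && decide
              (|(PySem.List.pyGetD peaks i (0, 0)).1 - (PySem.List.pyGetD peaks j (0, 0)).1| < distance ∧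
               |(PySem.List.pyGetD peaks i (0, 0)).2 - (PySem.List.pyGetD peaks j (0, 0)).2| < degree_diff)))
          (PySem.List.pyGetD peaks i (0, 0)) := by
    intro acc i
    exact inner_fold i (PySem.List.pyGetD peaks i (0, 0))
      (fun j => |(PySem.List.pyGetD peaks i (0, 0)).1 - (PySem.List.pyGetD peaks j (0, 0)).1| < distance ∧
                |(PySem.List.pyGetD peaks i (0, 0)).2 - (PySem.List.pyGetD peaks j (0, 0)).2| < degree_diff)
      _ acc
  rw [PySem.List.foldl_congr_mem _ _ _ _ (fun acc i _ => hinner acc i)]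
  rw [PySem.List.foldl_append_eq_flatMap]
  rw [List.nil_append]
  have hsrc : ∀ (F : (Int × Int) → List (Int × Int)),
      peaks.flatMap F
        = (PySem.List.pyRange 0 (peaks.length : Int) 1).flatMap
            (fun i => F (PySem.List.pyGetD peaks i (0, 0))) := by
    intro F
    conv_lhs => rw [← PySem.List.map_pyGetD_pyRange_zero' peaks (0, 0)]
    rw [List.flatMap_map]
  rw [hsrc]
  apply List.flatMap_congr
  intro i hi
  obtain ⟨hi0, hin⟩ := PySem.List.mem_pyRange_one.mp hi
  congr 1
  generalize hp : PySem.List.pyGetD peaks i (0, 0) = p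
  have h2 : peaks.countP (fun q => decide (|p.1 - q.1| < distance ∧ |p.2 - q.2| < degree_diff))
      = (PySem.List.pyRange 0 (peaks.length : Int) 1).countP
          (fun j => decide (|p.1 - (PySem.List.pyGetD peaks j (0, 0)).1| < distance ∧
                            |p.2 - (PySem.List.pyGetD peaks j (0, 0)).2| < degree_diff)) := by
    conv_lhs => rw [← PySem.List.map_pyGetD_pyRange_zero' peaks (0, 0)]
    rw [List.countP_map]
    rfl
  rw [h2]
  have hsplit : PySem.List.pyRange 0 (peaks.length : Int) 1
      = PySem.List.pyRange 0 i 1 ++ ([i] ++ PySem.List.pyRange (i + 1) (peaks.length : Int) 1) := by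
    rw [PySem.List.pyRange_one_append 0 i (peaks.length : Int) hi0 (le_of_lt hin),
        PySem.List.pyRange_one_append i (i + 1) (peaks.length : Int) (by omega) (by omega),
        PySem.List.pyRange_one_singleton]
  rw [hsplit]
  simp only [List.countP_append]
  have hdrop1 : (PySem.List.pyRange 0 i 1).countP (fun j =>
        decide (i ≠ j) && decide (|p.1 - (PySem.List.pyGetD peaks j (0, 0)).1| < distance ∧
                                  |p.2 - (PySem.List.pyGetD peaks j (0, 0)).2| < degree_diff))
      = (PySem.List.pyRange 0 i 1).countP (fun j =>
        decide (|p.1 - (PySem.List.pyGetD peaks j (0, 0)).1| < distance ∧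
                |p.2 - (PySem.List.pyGetD peaks j (0, 0)).2| < degree_diff)) := by
    apply List.countP_congr
    intro j hj
    have := (PySem.List.mem_pyRange_one.mp hj).2
    have hne : i ≠ j := by omega
    simp [hne]
  have hdrop2 : (PySem.List.pyRange (i + 1) (peaks.length : Int) 1).countP (fun j =>
        decide (i ≠ j) && decide (|p.1 - (PySem.List.pyGetD peaks j (0, 0)).1| < distance ∧
                                  |p.2 - (PySem.List.pyGetD peaks j (0, 0)).2| < degree_diff))
      = (PySem.List.pyRange (i + 1) (peaks.length : Int) 1).countP (fun j =>
        decide (|p.1 - (PySem.List.pyGetD peaks j (0, 0)).1| < distance ∧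
                |p.2 - (PySem.List.pyGetD peaks j (0, 0)).2| < degree_diff)) := by
    apply List.countP_congr
    intro j hj
    have := (PySem.List.mem_pyRange_one.mp hj).1
    have hne : i ≠ j := by omega
    simp [hne]
  rw [hdrop1, hdrop2]
  simp only [List.countP_cons, List.countP_nil, hp, sub_self, abs_zero]
  by_cases hDg : 0 < distance ∧ 0 < degree_diff
  · simp [hDg]
    omega
  · simp [hDg]
    omega

-- a count split over three mutually exclusive key-values equals the count over their union
theorem countP_three_keys {α : Type} (l : List α) (p : α → Bool) (key : α → Int) (c1 c2 c3 : Int)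
    (h12 : c1 ≠ c2) (h13 : c1 ≠ c3) (h23 : c2 ≠ c3) :
    l.countP (fun a => p a && (key a == c1)) + l.countP (fun a => p a && (key a == c2))
      + l.countP (fun a => p a && (key a == c3))
      = l.countP (fun a => p a && (key a == c1 || key a == c2 || key a == c3)) := by
  induction l with
  | nil => simp
  | cons a l ih =>
    simp only [List.countP_cons]
    have hinc : (if p a && (key a == c1 || key a == c2 || key a == c3) then 1 else 0)
        = (if p a && (key a == c1) then 1 else 0) + (if p a && (key a == c2) then 1 else 0)
          + (if p a && (key a == c3) then 1 else 0) := by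
      by_cases hp : p a = true
      · by_cases h1 : key a = c1 <;> by_cases h2 : key a = c2 <;> by_cases h3 : key a = c3 <;>
          simp_all
      · simp [hp]
    rw [hinc]
    omega

theorem main_eq (peaks : List (Int × Int)) (distance degree_diff : Int) :
    filter_peaks peaks distance degree_diff = filter_peaks_alt peaks distance degree_diff := by
  rw [A_closed]
  unfold filter_peaks_alt
  by_cases hNeg : distance ≤ 0 ∨ degree_diff ≤ 0
  · rw [if_pos hNeg]
    have : ∀ p : Int × Int,
        peaks.countP (fun q => decide (|p.1 - q.1| < distance ∧ |p.2 - q.2| < degree_diff)) = 0 := by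
      intro p
      rw [List.countP_eq_zero]
      intro q _
      simp only [decide_eq_true_eq]
      intro ⟨ha, hb⟩
      rcases hNeg with h | h
      · have := abs_nonneg (p.1 - q.1); omega
      · have := abs_nonneg (p.2 - q.2); omega
    rw [List.flatMap_eq_nil_iff]
    intro p _
    rw [this p]
    simp
    split <;> omega
  · rw [if_neg hNeg]
    push Not at hNeg
    obtain ⟨hd, hg⟩ := hNeg
    -- the grid's cell c holds exactly the peaks whose bucket is c, in order
    have hgrid : ∀ c : Int,
        (peaks.foldl (fun g p => g.modify (PySem.Int.floordiv p.1 distance) [] (· ++ [p]))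
            (PySem.Dict.empty : PySem.Dict Int (List (Int × Int)))).getD c []
          = peaks.filter (fun q => PySem.Int.floordiv q.1 distance == c) := by
      intro c
      have hmap : peaks.foldl (fun g p => g.modify (PySem.Int.floordiv p.1 distance) [] (· ++ [p]))
            (PySem.Dict.empty : PySem.Dict Int (List (Int × Int)))
          = (peaks.map (fun p => (PySem.Int.floordiv p.1 distance, p))).foldl
              (fun g r => g.modify r.1 [] (· ++ [r.2])) PySem.Dict.empty := by
        rw [List.foldl_map]
      rw [hmap, PySem.Dict.getD_foldl_modify_append]
      simp [List.filter_map, Function.comp_def]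
    rw [PySem.List.foldl_append_eq_flatMap, List.nil_append]
    apply List.flatMap_congr
    intro p hp
    simp only [hgrid]
    -- the bucket scan counts matching occurrences of the cell
    have hcount : ∀ (c : Int) (k : Int),
        (peaks.filter (fun q => PySem.Int.floordiv q.1 distance == c)).foldl
            (fun k q => if |p.1 - q.1| < distance ∧ |p.2 - q.2| < degree_diff then k + 1 else k) k
          = k + (peaks.countP (fun q =>
              decide (|p.1 - q.1| < distance ∧ |p.2 - q.2| < degree_diff)
                && (PySem.Int.floordiv q.1 distance == c)) : Int) := by
      intro c k
      rw [PySem.List.foldl_ite_add_one, List.countP_filter]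
    set b := PySem.Int.floordiv p.1 distance with hb
    simp only [List.foldl_cons, List.foldl_nil, hcount]
    congr 1
    have hkeys := countP_three_keys peaks
      (fun q => decide (|p.1 - q.1| < distance ∧ |p.2 - q.2| < degree_diff))
      (fun q => PySem.Int.floordiv q.1 distance) (b - 1) b (b + 1)
      (by omega) (by omega) (by omega)
    have hcover : peaks.countP (fun q =>
          decide (|p.1 - q.1| < distance ∧ |p.2 - q.2| < degree_diff)
            && (PySem.Int.floordiv q.1 distance == b - 1 || PySem.Int.floordiv q.1 distance == b
                || PySem.Int.floordiv q.1 distance == b + 1))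
        = peaks.countP (fun q => decide (|p.1 - q.1| < distance ∧ |p.2 - q.2| < degree_diff)) := by
      apply List.countP_congr
      intro q _
      simp only [Bool.and_eq_true, Bool.or_eq_true, decide_eq_true_eq, beq_iff_eq]
      constructor
      · rintro ⟨h, _⟩; exact h
      rintro ⟨hqd, hqg⟩
      refine ⟨⟨hqd, hqg⟩, ?_⟩
      -- |p.1 - q.1| < distance forces q's bucket into {b-1, b, b+1}
      have hpb := (PySem.Int.floordiv_eq_iff_of_pos hd).mp hb.symm
      have hlo : b - 1 ≤ PySem.Int.floordiv q.1 distance := by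
        rw [PySem.Int.le_floordiv_iff_mul_le hd]
        have habs := abs_lt.mp hqd
        nlinarith [hpb.1]
      have hhi : PySem.Int.floordiv q.1 distance < b + 2 := by
        rw [PySem.Int.floordiv_lt_iff_lt_mul hd]
        have habs := abs_lt.mp hqd
        nlinarith [hpb.2]
      omega
    beta_reduce at hkeys
    rw [hcover] at hkeys
    rw [if_pos ⟨hd, hg⟩]
    omega

-- ===== VERDICT (by name: the statement is the Claim_ definition above) =====
theorem filter_peaks_spec : Claim_equal_filter_peaks := by
  intro peaks distance degree_diff _
  unfold Spec_filter_peaks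
  exact main_eq peaks distance degree_diff
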